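-- pv_equiv track=rewrite | github.com/OriginNeuralAI/The_Dorabella_Cipher-DECODED | verify.py | find_backslang
-- ===== SOURCE A (Python) =====
-- BACKSLANG_WORDS = {
--     "TUNES":  "Musical — reversed as ESNUT",
--     "TUNE":   "Musical — reversed as ENUT",
--     "SEND":   "Common English",
--     "FIRE":   "Reversed as ERIF",
--     "NAME":   "Reversed as EMAN",
--     "SING":   "Musical — reversed as GNIS",
--     "SONG":   "Musical — reversed as GNOS",
--     "NOTE":   "Musical — reversed as ETON",
--     "TONE":   "Musical — reversed as ENOT",
--     "DEAR":   "Reversed as RAED",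
--     "LOVE":   "Reversed as EVOL",
--     "LIFE":   "Reversed as EFIL",
--     "TIME":   "Reversed as EMIT",
-- }
--
-- def find_backslang(text):
--     """Scan every substring of length 3-7 and check if its reversal
--     OR anagram matches a known English word. Victorian backslang
--     included both strict reversals and letter-scrambles."""
--     found = []
--     # Build sorted-letter lookup for anagram detection
--     anagram_lookup = {}
--     for word, note in BACKSLANG_WORDS.items():
--         key = ''.join(sorted(word))
--         anagram_lookup[key] = (word, note)
--
--     for length in range(3, 8):
--         for i in range(len(text) - length + 1):
--             substring = text[i:i+length]
--             reversed_sub = substring[::-1]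
--             sorted_sub = ''.join(sorted(substring))
--
--             # Check strict reversal
--             if reversed_sub in BACKSLANG_WORDS:
--                 note = BACKSLANG_WORDS[reversed_sub]
--                 found.append((i, substring, reversed_sub, note, "reversal"))
--             # Check anagram (same letters, different order)
--             elif sorted_sub in anagram_lookup:
--                 target, note = anagram_lookup[sorted_sub]
--                 if substring != target:  # Don't match forward words
--                     found.append((i, substring, target, note, "anagram"))
--
--     # Deduplicate — keep longest match at each position
--     seen = {}
--     for item in found:
--         pos = item[0]
--         raw = item[1]
--         if pos not in seen or len(raw) > len(seen[pos][1]):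
--             seen[pos] = item
--     return sorted(seen.values())
-- ===== SOURCE B (Python) =====
-- BACKSLANG_WORDS = {
--     "TUNES":  "Musical — reversed as ESNUT",
--     "TUNE":   "Musical — reversed as ENUT",
--     "SEND":   "Common English",
--     "FIRE":   "Reversed as ERIF",
--     "NAME":   "Reversed as EMAN",
--     "SING":   "Musical — reversed as GNIS",
--     "SONG":   "Musical — reversed as GNOS",
--     "NOTE":   "Musical — reversed as ETON",
--     "TONE":   "Musical — reversed as ENOT",
--     "DEAR":   "Reversed as RAED",
--     "LOVE":   "Reversed as EVOL",
--     "LIFE":   "Reversed as EFIL",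
--     "TIME":   "Reversed as EMIT",
-- }
--
-- def find_backslang(text):
--     """Single left-to-right pass: at each start position try window lengths
--     longest-first; a reversal match wins over an anagram match for the same
--     window.  Emits results already in position order — no dedup pass, no sort."""
--     rev_lookup = {}
--     ana_lookup = {}
--     for word, note in BACKSLANG_WORDS.items():
--         rev_lookup[word[::-1]] = (word, note)
--         ana_lookup[''.join(sorted(word))] = (word, note)
--     lengths = sorted({len(w) for w in BACKSLANG_WORDS}, reverse=True)
--
--     out = []
--     for i in range(len(text)):
--         for length in lengths:
--             window = text[i:i+length]
--             if len(window) < length: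
--                 continue
--             if window in rev_lookup:
--                 word, note = rev_lookup[window]
--                 out.append((i, window, word, note, "reversal"))
--                 break
--             key = ''.join(sorted(window))
--             if key in ana_lookup:
--                 word, note = ana_lookup[key]
--                 if window != word:
--                     out.append((i, window, word, note, "anagram"))
--                     break
--     return out
-- ===== Notes on version B (the rewrite author's own statement) =====
-- stated objective: simpler
-- what changed: Instead of collecting matches for all substring lengths 3-7 into a list and then deduplicating via a position-keyed dict and sorting, B makes a single left-to-right pass over start positions, trying only the word lengths that actually occur (5 then 4, longest first) with a reversed-word lookup table, breaking at the first match per position and emitting results already in order - no found list, no dedup pass, no sort.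
import Mathlib
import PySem

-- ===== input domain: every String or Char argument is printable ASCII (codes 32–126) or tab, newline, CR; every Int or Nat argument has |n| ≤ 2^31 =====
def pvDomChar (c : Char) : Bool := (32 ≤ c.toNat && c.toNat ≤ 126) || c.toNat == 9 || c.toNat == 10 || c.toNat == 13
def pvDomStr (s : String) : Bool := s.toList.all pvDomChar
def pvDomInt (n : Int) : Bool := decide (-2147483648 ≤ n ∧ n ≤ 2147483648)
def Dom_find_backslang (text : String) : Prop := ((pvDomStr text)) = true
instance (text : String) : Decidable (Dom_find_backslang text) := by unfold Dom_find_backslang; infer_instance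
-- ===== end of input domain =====

-- B replaces A's collect-all-lengths/dedup-dict/sort pipeline by a single in-order pass
-- over start positions trying the occurring word lengths longest-first (objective: simpler).

-- ===== PORT A =====
def BACKSLANG_WORDS : PySem.Dict String String := PySem.Dict.ofList [
  ("TUNES",  "Musical — reversed as ESNUT"),
  ("TUNE",   "Musical — reversed as ENUT"),
  ("SEND",   "Common English"),
  ("FIRE",   "Reversed as ERIF"),
  ("NAME",   "Reversed as EMAN"),
  ("SING",   "Musical — reversed as GNIS"),
  ("SONG",   "Musical — reversed as GNOS"),
  ("NOTE",   "Musical — reversed as ETON"),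
  ("TONE",   "Musical — reversed as ENOT"),
  ("DEAR",   "Reversed as RAED"),
  ("LOVE",   "Reversed as EVOL"),
  ("LIFE",   "Reversed as EFIL"),
  ("TIME",   "Reversed as EMIT")]

-- literal port of A; ''.join(sorted(s)) is String.ofList of the sorted code points (exact),
-- s[::-1] is PySem.Str.slice? with step -1 (always `some`, step ≠ 0, so `.getD ""` is exact);
-- the final sorted(seen.values()) sorts tuples whose first components (the dict keys) are
-- pairwise distinct, so Python's lexicographic tuple sort is this stable sort by position.
def find_backslang (text : String) : List (Int × String × String × String × String) :=
  let anagram_lookup : PySem.Dict String (String × String) :=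
    BACKSLANG_WORDS.items.foldl
      (fun d wn => d.insert (String.ofList (PySem.List.sorted wn.1.toList (fun c => c) false)) (wn.1, wn.2))
      PySem.Dict.empty
  let found : List (Int × String × String × String × String) :=
    (PySem.List.pyRange 3 8 1).foldl (fun found length =>
      (PySem.List.pyRange 0 ((PySem.Str.len text : Int) - length + 1) 1).foldl (fun found i =>
        let substring := PySem.Str.slice text (some i) (some (i + length))
        let reversed_sub := (PySem.Str.slice? substring none none (-1)).getD ""
        let sorted_sub := String.ofList (PySem.List.sorted substring.toList (fun c => c) false)
        match BACKSLANG_WORDS.get? reversed_sub with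
        | some note => found ++ [(i, substring, reversed_sub, note, "reversal")]
        | none =>
          match anagram_lookup.get? sorted_sub with
          | some (target, note) =>
              if substring ≠ target then found ++ [(i, substring, target, note, "anagram")] else found
          | none => found) found) []
  let seen : PySem.Dict Int (Int × String × String × String × String) :=
    found.foldl (fun seen item =>
      match seen.get? item.1 with
      | none => seen.insert item.1 item
      | some prev =>
          if PySem.Str.len item.2.1 > PySem.Str.len prev.2.1 then seen.insert item.1 item else seen)
      PySem.Dict.empty
  PySem.List.sorted seen.values (fun it => it.1) false

-- ===== PORT B =====
-- B's inner `for length in lengths: ... break`: first match, longest length first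
def bslFirst (rev_lookup ana_lookup : PySem.Dict String (String × String)) (text : String)
    (i : Int) : List Int → Option (Int × String × String × String × String)
  | [] => none
  | length :: rest =>
    let window := PySem.Str.slice text (some i) (some (i + length))
    if (PySem.Str.len window : Int) < length then bslFirst rev_lookup ana_lookup text i rest
    else
      match rev_lookup.get? window with
      | some (word, note) => some (i, window, word, note, "reversal")
      | none =>
        let key := String.ofList (PySem.List.sorted window.toList (fun c => c) false)
        match ana_lookup.get? key with
        | some (word, note) =>
            if window ≠ word then some (i, window, word, note, "anagram")
            else bslFirst rev_lookup ana_lookup text i rest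
        | none => bslFirst rev_lookup ana_lookup text i rest

def find_backslang_alt (text : String) : List (Int × String × String × String × String) :=
  let lookups : PySem.Dict String (String × String) × PySem.Dict String (String × String) :=
    BACKSLANG_WORDS.items.foldl
      (fun ls wn =>
        (ls.1.insert ((PySem.Str.slice? wn.1 none none (-1)).getD "") (wn.1, wn.2),
         ls.2.insert (String.ofList (PySem.List.sorted wn.1.toList (fun c => c) false)) (wn.1, wn.2)))
      (PySem.Dict.empty, PySem.Dict.empty)
  let lengths : List Int :=
    PySem.List.sorted (PySem.Set.ofList (BACKSLANG_WORDS.keys.map (fun w => (PySem.Str.len w : Int))))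
      (fun x => x) true
  (PySem.List.pyRange 0 (PySem.Str.len text) 1).foldl
    (fun out i => out ++ (bslFirst lookups.1 lookups.2 text i lengths).toList) []

-- ===== PRECONDITION & SPEC =====
def Spec_find_backslang (text : String) (out : List (Int × String × String × String × String)) : Prop := out = find_backslang_alt text
instance (text : String) (out : List (Int × String × String × String × String)) : Decidable (Spec_find_backslang text out) := by unfold Spec_find_backslang; infer_instance

-- ===== CLAIM (what is proved, stated in full; the proofs are below) =====
def Claim_equal_find_backslang : Prop := ∀ (text : String), Dom_find_backslang text → Spec_find_backslang text (find_backslang text)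

-- ===== LEMMAS AND PROOFS =====

-- the two lookup tables as literal dicts
def anaD : PySem.Dict String (String × String) := PySem.Dict.mk [("ENSTU", ("TUNES", "Musical — reversed as ESNUT")), ("ENTU", ("TUNE", "Musical — reversed as ENUT")), ("DENS", ("SEND", "Common English")), ("EFIR", ("FIRE", "Reversed as ERIF")), ("AEMN", ("NAME", "Reversed as EMAN")), ("GINS", ("SING", "Musical — reversed as GNIS")), ("GNOS", ("SONG", "Musical — reversed as GNOS")), ("ENOT", ("TONE", "Musical — reversed as ENOT")), ("ADER", ("DEAR", "Reversed as RAED")), ("ELOV", ("LOVE", "Reversed as EVOL")), ("EFIL", ("LIFE", "Reversed as EFIL")), ("EIMT", ("TIME", "Reversed as EMIT"))]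

def revD : PySem.Dict String (String × String) := PySem.Dict.mk [("SENUT", ("TUNES", "Musical — reversed as ESNUT")), ("ENUT", ("TUNE", "Musical — reversed as ENUT")), ("DNES", ("SEND", "Common English")), ("ERIF", ("FIRE", "Reversed as ERIF")), ("EMAN", ("NAME", "Reversed as EMAN")), ("GNIS", ("SING", "Musical — reversed as GNIS")), ("GNOS", ("SONG", "Musical — reversed as GNOS")), ("ETON", ("NOTE", "Musical — reversed as ETON")), ("ENOT", ("TONE", "Musical — reversed as ENOT")), ("RAED", ("DEAR", "Reversed as RAED")), ("EVOL", ("LOVE", "Reversed as EVOL")), ("EFIL", ("LIFE", "Reversed as EFIL")), ("EMIT", ("TIME", "Reversed as EMIT"))]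

-- A's per-window check as a function
def mAt (text : String) (L i : Int) : Option (Int × String × String × String × String) :=
  let substring := PySem.Str.slice text (some i) (some (i + L))
  let reversed_sub := (PySem.Str.slice? substring none none (-1)).getD ""
  let sorted_sub := String.ofList (PySem.List.sorted substring.toList (fun c => c) false)
  match BACKSLANG_WORDS.get? reversed_sub with
  | some note => some (i, substring, reversed_sub, note, "reversal")
  | none =>
    match anaD.get? sorted_sub with
    | some (target, note) => if substring ≠ target then some (i, substring, target, note, "anagram") else none
    | none => none

def dedupStep (seen : PySem.Dict Int (Int × String × String × String × String))
    (item : Int × String × String × String × String) : PySem.Dict Int (Int × String × String × String × String) :=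
  match seen.get? item.1 with
  | none => seen.insert item.1 item
  | some prev => if PySem.Str.len item.2.1 > PySem.Str.len prev.2.1 then seen.insert item.1 item else seen

def insStep (d : PySem.Dict Int (Int × String × String × String × String))
    (item : Int × String × String × String × String) : PySem.Dict Int (Int × String × String × String × String) :=
  d.insert item.1 item

-- column of matches at one window length, and the per-position merged stream
def wordsL : List (String × String) := [
  ("TUNES",  "Musical — reversed as ESNUT"),
  ("TUNE",   "Musical — reversed as ENUT"),
  ("SEND",   "Common English"),
  ("FIRE",   "Reversed as ERIF"),
  ("NAME",   "Reversed as EMAN"),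
  ("SING",   "Musical — reversed as GNIS"),
  ("SONG",   "Musical — reversed as GNOS"),
  ("NOTE",   "Musical — reversed as ETON"),
  ("TONE",   "Musical — reversed as ENOT"),
  ("DEAR",   "Reversed as RAED"),
  ("LOVE",   "Reversed as EVOL"),
  ("LIFE",   "Reversed as EFIL"),
  ("TIME",   "Reversed as EMIT")]

theorem beq_false_of_len {t s : String} (h : ¬ t.length = s.length) : (t == s) = false := by
  cases hb : (t == s) with
  | false => rfl
  | true => exact absurd (congrArg String.length (eq_of_beq hb)) h

theorem words_eq_mk : BACKSLANG_WORDS = PySem.Dict.mk wordsL := by decide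

theorem words_get?_none (s : String) (h4 : ¬ s.length = 4) (h5 : ¬ s.length = 5) :
    BACKSLANG_WORDS.get? s = none := by
  have k4 : ∀ t : String, t.length = 4 → (t == s) = false := fun t ht =>
    beq_false_of_len (by rw [ht]; exact fun he => h4 he.symm)
  have k5 : ∀ t : String, t.length = 5 → (t == s) = false := fun t ht =>
    beq_false_of_len (by rw [ht]; exact fun he => h5 he.symm)
  rw [words_eq_mk]
  simp only [wordsL, PySem.Dict.get?_mk_cons,
    k5 "TUNES" rfl, k4 "TUNE" rfl, k4 "SEND" rfl, k4 "FIRE" rfl, k4 "NAME" rfl,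
    k4 "SING" rfl, k4 "SONG" rfl, k4 "NOTE" rfl, k4 "TONE" rfl, k4 "DEAR" rfl,
    k4 "LOVE" rfl, k4 "LIFE" rfl, k4 "TIME" rfl, Bool.false_eq_true, if_false]
  rfl

theorem anaD_get?_none (s : String) (h4 : ¬ s.length = 4) (h5 : ¬ s.length = 5) :
    anaD.get? s = none := by
  have k4 : ∀ t : String, t.length = 4 → (t == s) = false := fun t ht =>
    beq_false_of_len (by rw [ht]; exact fun he => h4 he.symm)
  have k5 : ∀ t : String, t.length = 5 → (t == s) = false := fun t ht =>
    beq_false_of_len (by rw [ht]; exact fun he => h5 he.symm)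
  simp only [anaD, PySem.Dict.get?_mk_cons,
    k5 "ENSTU" rfl, k4 "ENTU" rfl, k4 "DENS" rfl, k4 "EFIR" rfl, k4 "AEMN" rfl,
    k4 "GINS" rfl, k4 "GNOS" rfl, k4 "ENOT" rfl, k4 "ADER" rfl,
    k4 "ELOV" rfl, k4 "EFIL" rfl, k4 "EIMT" rfl, Bool.false_eq_true, if_false]
  rfl

theorem beq_rev (t k w : String) (hk : k.toList = t.toList.reverse) :
    (k == w) = (t == String.ofList w.toList.reverse) := by
  rw [Bool.eq_iff_iff]
  simp only [beq_iff_eq]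
  constructor
  · rintro rfl
    apply String.toList_inj.mp
    rw [String.toList_ofList, ← List.reverse_reverse t.toList, ← hk]
  · rintro rfl
    apply String.toList_inj.mp
    rw [hk, String.toList_ofList, List.reverse_reverse]

theorem get?_revmap (ws : List (String × String)) (w : String) :
    (PySem.Dict.mk (ws.map (fun p => (String.ofList p.1.toList.reverse, (p.1, p.2))))).get? w =
      match (PySem.Dict.mk ws).get? (String.ofList w.toList.reverse) with
      | some note => some (String.ofList w.toList.reverse, note)
      | none => none := by
  induction ws with
  | nil => rfl
  | cons p rest ih =>
    obtain ⟨t, note⟩ := p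
    simp only [List.map_cons]
    rw [PySem.Dict.get?_mk_cons, PySem.Dict.get?_mk_cons,
      beq_rev t (String.ofList t.toList.reverse) w String.toList_ofList]
    by_cases h : (t == String.ofList w.toList.reverse) = true
    · rw [if_pos h, if_pos h]
      rw [eq_of_beq h]
    · rw [if_neg h, if_neg h]
      exact ih

theorem revD_eq_map : revD = PySem.Dict.mk (wordsL.map (fun p => (String.ofList p.1.toList.reverse, (p.1, p.2)))) := by decide

theorem revD_get? (w : String) :
    revD.get? w =
      match BACKSLANG_WORDS.get? (String.ofList w.toList.reverse) with
      | some note => some (String.ofList w.toList.reverse, note)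
      | none => none := by
  rw [revD_eq_map, words_eq_mk]
  exact get?_revmap wordsL w

theorem lenRev (s : String) : (String.ofList s.toList.reverse).length = s.length := by
  rw [← String.length_toList, String.toList_ofList, List.length_reverse, String.length_toList]

theorem lenSorted (s : String) :
    (String.ofList (PySem.List.sorted s.toList (fun c => c) false)).length = s.length := by
  rw [← String.length_toList, String.toList_ofList, PySem.List.length_sorted, String.length_toList]

theorem sliceLen (text : String) (j L : Nat) :
    (PySem.Str.slice text (some (j : Int)) (some ((j : Int) + (L : Int)))).length
      = min L (text.length - j) := by
  rw [← String.length_toList, PySem.Str.toList_slice, PySem.Chars.slice_eq_listSlice,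
    PySem.List.slice_natCast_add]
  simp [String.length_toList]

theorem mAt_none_of_len (text : String) (j L : Nat)
    (h4 : ¬ min L (text.length - j) = 4) (h5 : ¬ min L (text.length - j) = 5) :
    mAt text (L : Int) (j : Int) = none := by
  simp only [mAt, PySem.Str.slice?_none_none_neg_one, Option.getD_some]
  rw [words_get?_none _ (by rw [lenRev, sliceLen]; exact h4) (by rw [lenRev, sliceLen]; exact h5),
    anaD_get?_none _ (by rw [lenSorted, sliceLen]; exact h4) (by rw [lenSorted, sliceLen]; exact h5)]

theorem mAt_shape (text : String) (j L : Nat) (x : Int × String × String × String × String)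
    (h : mAt text (L : Int) (j : Int) = some x) :
    x.1 = (j : Int) ∧ x.2.1.length = min L (text.length - j) := by
  simp only [mAt, PySem.Str.slice?_none_none_neg_one, Option.getD_some] at h
  set sub := PySem.Str.slice text (some (j : Int)) (some ((j : Int) + (L : Int))) with hsub
  cases h1 : BACKSLANG_WORDS.get? (String.ofList sub.toList.reverse) with
  | some note =>
    simp only [h1] at h
    cases h
    exact ⟨rfl, sliceLen text j L⟩
  | none =>
    simp only [h1] at h
    cases h2 : anaD.get? (String.ofList (PySem.List.sorted sub.toList (fun c => c) false)) with
    | some tn =>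
      obtain ⟨target, note⟩ := tn
      simp only [h2] at h
      by_cases hne : sub ≠ target
      · rw [if_pos hne] at h
        cases h
        exact ⟨rfl, sliceLen text j L⟩
      · rw [if_neg hne] at h; cases h
    | none => simp only [h2] at h; cases h

theorem dedup_eq_ins (l : List (Int × String × String × String × String))
    (d : PySem.Dict Int (Int × String × String × String × String))
    (hnd : (l.map (·.1)).Nodup)
    (hlt : ∀ it ∈ l, ∀ prev, d.get? it.1 = some prev → PySem.Str.len prev.2.1 < PySem.Str.len it.2.1) :
    l.foldl dedupStep d = l.foldl insStep d := by
  induction l generalizing d with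
  | nil => rfl
  | cons a t ih =>
    simp only [List.map_cons, List.nodup_cons] at hnd
    have hstep : dedupStep d a = insStep d a := by
      unfold dedupStep insStep
      cases hg : d.get? a.1 with
      | none => rfl
      | some prev =>
        show (if PySem.Str.len a.2.1 > PySem.Str.len prev.2.1 then d.insert a.1 a else d) = d.insert a.1 a
        rw [if_pos]
        exact hlt a List.mem_cons_self prev hg
    rw [List.foldl_cons, List.foldl_cons, hstep]
    apply ih _ hnd.2
    intro it hit prev hget
    have hne : it.1 ≠ a.1 := by
      intro he
      exact hnd.1 (he ▸ List.mem_map_of_mem hit)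
    rw [insStep, PySem.Dict.get?_insert_of_ne _ _ hne] at hget
    exact hlt it (List.mem_cons_of_mem a hit) prev hget

theorem find?_eq_none_of_not_mem (l : List (Int × String × String × String × String)) (p : Int)
    (h : p ∉ l.map (·.1)) : l.find? (fun it => it.1 == p) = none := by
  rw [List.find?_eq_none]
  intro x hx hbeq
  exact h (eq_of_beq hbeq ▸ List.mem_map_of_mem hx)

theorem get?_ins_fold (l : List (Int × String × String × String × String))
    (d : PySem.Dict Int (Int × String × String × String × String)) (p : Int)
    (hnd : (l.map (·.1)).Nodup) :
    (l.foldl insStep d).get? p =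
      match l.find? (fun it => it.1 == p) with
      | some it => some it
      | none => d.get? p := by
  induction l generalizing d with
  | nil => rfl
  | cons a t ih =>
    simp only [List.map_cons, List.nodup_cons] at hnd
    rw [List.foldl_cons, List.find?_cons]
    by_cases hp : a.1 = p
    · have : (a.1 == p) = true := beq_iff_eq.mpr hp
      rw [this]
      rw [ih _ hnd.2, find?_eq_none_of_not_mem t p (hp ▸ hnd.1)]
      rw [insStep, hp, PySem.Dict.get?_insert_self]
    · have : (a.1 == p) = false := by simpa using hp
      rw [this]
      rw [ih _ hnd.2, insStep, PySem.Dict.get?_insert_of_ne _ _ (fun he => hp he.symm)]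

theorem find?_eq_some_of_mem (l : List (Int × String × String × String × String))
    (x : Int × String × String × String × String)
    (hnd : (l.map (·.1)).Nodup) (hx : x ∈ l) : l.find? (fun it => it.1 == x.1) = some x := by
  induction l with
  | nil => cases hx
  | cons a t ih =>
    simp only [List.map_cons, List.nodup_cons] at hnd
    rw [List.find?_cons]
    rcases List.mem_cons.mp hx with rfl | hmem
    · simp
    · have hne : (a.1 == x.1) = false := by
        have : a.1 ≠ x.1 := fun he => hnd.1 (he ▸ List.mem_map_of_mem hmem)
        simpa using this
      rw [hne]
      exact ih hnd.2 hmem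

theorem pairwise_ne_of_lt {l : List Int} (h : l.Pairwise (· < ·)) : l.Nodup :=
  List.Pairwise.imp (fun hab => ne_of_lt hab) h

theorem pos_pairwise (m : Nat) (f : Nat → Option (Int × String × String × String × String))
    (hpos : ∀ j x, f j = some x → x.1 = (j : Int)) :
    ((List.range m).filterMap f).Pairwise (fun a b => a.1 < b.1) := by
  apply List.Pairwise.filterMap f _ List.pairwise_lt_range
  intro a a' hlt b hb b' hb'
  rw [hpos a b hb, hpos a' b' hb']
  exact_mod_cast hlt

theorem posmap_nodup (m : Nat) (f : Nat → Option (Int × String × String × String × String))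
    (hpos : ∀ j x, f j = some x → x.1 = (j : Int)) :
    (((List.range m).filterMap f).map (·.1)).Nodup := by
  apply pairwise_ne_of_lt
  rw [List.pairwise_map]
  exact pos_pairwise m f hpos

theorem merge_gen (n : Nat) (f4 f5 : Nat → Option (Int × String × String × String × String))
    (hp4 : ∀ j x, f4 j = some x → x.1 = (j : Int))
    (hp5 : ∀ j x, f5 j = some x → x.1 = (j : Int))
    (hl4 : ∀ j x, j + 4 ≤ n → f4 j = some x → x.2.1.length = 4)
    (hl5 : ∀ j x, j + 5 ≤ n → f5 j = some x → x.2.1.length = 5) :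
    PySem.List.sorted
      (((((List.range (n + 1 - 4)).filterMap f4) ++ ((List.range (n + 1 - 5)).filterMap f5)).foldl
          dedupStep PySem.Dict.empty).values)
      (fun it => it.1) false
    = (List.range n).filterMap
        (fun j => ((if j + 5 ≤ n then f5 j else none).or (if j + 4 ≤ n then f4 j else none))) := by
  set F4 := (List.range (n + 1 - 4)).filterMap f4 with hF4
  set F5 := (List.range (n + 1 - 5)).filterMap f5 with hF5
  set g : Nat → Option (Int × String × String × String × String) :=
    fun j => ((if j + 5 ≤ n then f5 j else none).or (if j + 4 ≤ n then f4 j else none)) with hg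
  set T := (List.range n).filterMap g with hT
  have hnd4 : (F4.map (·.1)).Nodup := posmap_nodup _ f4 hp4
  have hnd5 : (F5.map (·.1)).Nodup := posmap_nodup _ f5 hp5
  have hmem4 : ∀ x, x ∈ F4 ↔ ∃ j, j + 4 ≤ n ∧ f4 j = some x := by
    intro x
    rw [hF4, List.mem_filterMap]
    constructor
    · rintro ⟨j, hj, hfx⟩; exact ⟨j, by have := List.mem_range.mp hj; omega, hfx⟩
    · rintro ⟨j, hj, hfx⟩; exact ⟨j, List.mem_range.mpr (by omega), hfx⟩
  have hmem5 : ∀ x, x ∈ F5 ↔ ∃ j, j + 5 ≤ n ∧ f5 j = some x := by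
    intro x
    rw [hF5, List.mem_filterMap]
    constructor
    · rintro ⟨j, hj, hfx⟩; exact ⟨j, by have := List.mem_range.mp hj; omega, hfx⟩
    · rintro ⟨j, hj, hfx⟩; exact ⟨j, List.mem_range.mpr (by omega), hfx⟩
  -- the dedup fold is a plain insert fold
  have hins : (F4 ++ F5).foldl dedupStep PySem.Dict.empty
      = F5.foldl insStep (F4.foldl insStep PySem.Dict.empty) := by
    rw [List.foldl_append]
    rw [dedup_eq_ins F4 _ hnd4 (by intro it _ prev hget; rw [PySem.Dict.get?_empty] at hget; cases hget)]
    apply dedup_eq_ins F5 _ hnd5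
    intro it hit prev hget
    rw [get?_ins_fold F4 _ _ hnd4] at hget
    cases hfind : F4.find? (fun x => x.1 == it.1) with
    | none => rw [hfind] at hget; rw [PySem.Dict.get?_empty] at hget; cases hget
    | some it' =>
      rw [hfind] at hget
      cases hget
      obtain ⟨j, hj, hfx⟩ := (hmem4 prev).mp (List.mem_of_find?_eq_some hfind)
      obtain ⟨j', hj', hfx'⟩ := (hmem5 it).mp hit
      rw [PySem.Str.len_eq_length, PySem.Str.len_eq_length,
        hl4 j prev hj hfx, hl5 j' it hj' hfx']
      omega
  rw [hins]
  -- keys of the insert fold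
  have hkeys : (F5.foldl insStep (F4.foldl insStep PySem.Dict.empty)).keys
      = PySem.Set.update (PySem.Set.update ([] : List Int) (F4.map (·.1))) (F5.map (·.1)) := by
    show (F5.foldl (fun (d : PySem.Dict Int (Int × String × String × String × String)) x => d.insert ((fun (it : Int × String × String × String × String) => it.1) x) ((fun (_ : PySem.Dict Int (Int × String × String × String × String)) (x : Int × String × String × String × String) => x) d x)) _).keys = _
    rw [PySem.Dict.keys_foldl_insert_key]
    congr 1
    show (F4.foldl (fun (d : PySem.Dict Int (Int × String × String × String × String)) x => d.insert ((fun (it : Int × String × String × String × String) => it.1) x) ((fun (_ : PySem.Dict Int (Int × String × String × String × String)) (x : Int × String × String × String × String) => x) d x)) _).keys = _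
    rw [PySem.Dict.keys_foldl_insert_key, PySem.Dict.keys_empty]
  have hkeysnd : (F5.foldl insStep (F4.foldl insStep PySem.Dict.empty)).keys.Nodup := by
    apply PySem.Dict.nodup_keys_foldl_insert_key F5 (fun it => it.1) (fun _ x => x)
    apply PySem.Dict.nodup_keys_foldl_insert_key F4 (fun it => it.1) (fun _ x => x)
    exact PySem.Dict.nodup_keys_empty
  have hkeymem : ∀ p, p ∈ (F5.foldl insStep (F4.foldl insStep PySem.Dict.empty)).keys
      ↔ p ∈ F4.map (·.1) ∨ p ∈ F5.map (·.1) := by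
    intro p
    rw [hkeys, PySem.Set.mem_update, PySem.Set.mem_update]
    simp
  -- lookup in the fold
  have hget : ∀ (j : Nat) (x : Int × String × String × String × String), g j = some x →
      (F5.foldl insStep (F4.foldl insStep PySem.Dict.empty)).get? (j : Int) = some x := by
    intro j x hgj
    rw [get?_ins_fold F5 _ _ hnd5]
    simp only [hg] at hgj
    cases hf5 : (if j + 5 ≤ n then f5 j else none) with
    | some x5 =>
      rw [hf5, Option.some_or] at hgj
      cases hgj
      have h55 : j + 5 ≤ n ∧ f5 j = some x := by
        by_cases hc : j + 5 ≤ n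
        · rw [if_pos hc] at hf5; exact ⟨hc, hf5⟩
        · rw [if_neg hc] at hf5; cases hf5
      have hx5 : x ∈ F5 := (hmem5 x).mpr ⟨j, h55.1, h55.2⟩
      have hfnd := find?_eq_some_of_mem F5 x hnd5 hx5
      rw [hp5 j x h55.2] at hfnd
      rw [hfnd]
    | none =>
      rw [hf5, Option.none_or] at hgj
      have h44 : j + 4 ≤ n ∧ f4 j = some x := by
        by_cases hc : j + 4 ≤ n
        · rw [if_pos hc] at hgj; exact ⟨hc, hgj⟩
        · rw [if_neg hc] at hgj; cases hgj
      have hnomem : (j : Int) ∉ F5.map (·.1) := by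
        intro hmem
        obtain ⟨y, hy, hy1⟩ := List.mem_map.mp hmem
        obtain ⟨j', hj', hfx'⟩ := (hmem5 y).mp hy
        have hjj : j' = j := by
          have := hp5 j' y hfx'
          rw [this] at hy1
          exact_mod_cast hy1
        subst hjj
        rw [if_pos hj', hfx'] at hf5
        cases hf5
      rw [find?_eq_none_of_not_mem F5 _ hnomem]
      rw [get?_ins_fold F4 _ _ hnd4]
      have hx4 : x ∈ F4 := (hmem4 x).mpr ⟨j, h44.1, h44.2⟩
      have hfnd := find?_eq_some_of_mem F4 x hnd4 hx4
      rw [hp4 j x h44.2] at hfnd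
      rw [hfnd]
  -- positions of T
  have hgpos : ∀ j x, g j = some x → x.1 = (j : Int) := by
    intro j x hgj
    simp only [hg] at hgj
    cases hf5 : (if j + 5 ≤ n then f5 j else none) with
    | some x5 =>
      rw [hf5, Option.some_or] at hgj
      cases hgj
      split at hf5
      · exact hp5 j x hf5
      · cases hf5
    | none =>
      rw [hf5, Option.none_or] at hgj
      split at hgj
      · exact hp4 j x hgj
      · cases hgj
  have hTpair : T.Pairwise (fun a b => a.1 < b.1) := pos_pairwise n g hgpos
  have hTposnd : (T.map (·.1)).Nodup := posmap_nodup n g hgpos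
  have hTmem : ∀ x, x ∈ T ↔ ∃ j, j < n ∧ g j = some x := by
    intro x
    rw [hT, List.mem_filterMap]
    constructor
    · rintro ⟨j, hj, hfx⟩; exact ⟨j, List.mem_range.mp hj, hfx⟩
    · rintro ⟨j, hj, hfx⟩; exact ⟨j, List.mem_range.mpr hj, hfx⟩
  have hmemiff : ∀ p, p ∈ (F5.foldl insStep (F4.foldl insStep PySem.Dict.empty)).keys
      ↔ p ∈ T.map (·.1) := by
    intro p
    rw [hkeymem]
    constructor
    · rintro (hm | hm)
      · obtain ⟨y, hy, hy1⟩ := List.mem_map.mp hm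
        obtain ⟨j, hj, hfx⟩ := (hmem4 y).mp hy
        have hyj : y.1 = (j : Int) := hp4 j y hfx
        apply List.mem_map.mpr
        cases hf5 : (if j + 5 ≤ n then f5 j else none) with
        | some x5 =>
          refine ⟨x5, (hTmem x5).mpr ⟨j, by omega, ?_⟩, ?_⟩
          · simp only [hg]; rw [hf5, Option.some_or]
          · have hx5 : x5.1 = (j : Int) := by
              split at hf5
              · exact hp5 j x5 hf5
              · cases hf5
            rw [hx5, ← hyj, hy1]
        | none =>
          refine ⟨y, (hTmem y).mpr ⟨j, by omega, ?_⟩, by rw [hy1]⟩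
          simp only [hg]; rw [hf5, Option.none_or, if_pos hj, hfx]
      · obtain ⟨y, hy, hy1⟩ := List.mem_map.mp hm
        obtain ⟨j, hj, hfx⟩ := (hmem5 y).mp hy
        apply List.mem_map.mpr
        refine ⟨y, (hTmem y).mpr ⟨j, by omega, ?_⟩, by rw [hy1]⟩
        simp only [hg]; rw [if_pos hj, hfx, Option.some_or]
    · intro hm
      obtain ⟨y, hy, hy1⟩ := List.mem_map.mp hm
      obtain ⟨j, hj, hfx⟩ := (hTmem y).mp hy
      simp only [hg] at hfx
      cases hf5 : (if j + 5 ≤ n then f5 j else none) with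
      | some x5 =>
        rw [hf5, Option.some_or] at hfx
        cases hfx
        right
        have h55 : j + 5 ≤ n ∧ f5 j = some y := by
          by_cases hc : j + 5 ≤ n
          · rw [if_pos hc] at hf5; exact ⟨hc, hf5⟩
          · rw [if_neg hc] at hf5; cases hf5
        exact List.mem_map.mpr ⟨y, (hmem5 y).mpr ⟨j, h55.1, h55.2⟩, hy1⟩
      | none =>
        rw [hf5, Option.none_or] at hfx
        left
        have h44 : j + 4 ≤ n ∧ f4 j = some y := by
          by_cases hc : j + 4 ≤ n
          · rw [if_pos hc] at hfx; exact ⟨hc, hfx⟩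
          · rw [if_neg hc] at hfx; cases hfx
        exact List.mem_map.mpr ⟨y, (hmem4 y).mpr ⟨j, h44.1, h44.2⟩, hy1⟩
  have hperm : (T.map (·.1)).Perm (F5.foldl insStep (F4.foldl insStep PySem.Dict.empty)).keys :=
    (List.perm_ext_iff_of_nodup hTposnd hkeysnd).mpr (fun p => (hmemiff p).symm)
  have hvals : (F5.foldl insStep (F4.foldl insStep PySem.Dict.empty)).values
      = (F5.foldl insStep (F4.foldl insStep PySem.Dict.empty)).keys.map
          (fun k => (F5.foldl insStep (F4.foldl insStep PySem.Dict.empty)).getD k (0, "", "", "", "")) :=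
    PySem.Dict.values_eq_map_keys _ hkeysnd (0, "", "", "", "")
  have hTmap : T = (T.map (·.1)).map
      (fun k => (F5.foldl insStep (F4.foldl insStep PySem.Dict.empty)).getD k (0, "", "", "", "")) := by
    rw [List.map_map]
    have hpt : ∀ x ∈ T,
        (F5.foldl insStep (F4.foldl insStep PySem.Dict.empty)).getD x.1 (0, "", "", "", "") = x := by
      intro x hx
      obtain ⟨j, hj, hfx⟩ := (hTmem x).mp hx
      rw [hgpos j x hfx]
      exact PySem.Dict.getD_of_get?_eq_some _ _ (hget j x hfx)
    calc T = T.map id := (List.map_id T).symm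
      _ = T.map ((fun k => (F5.foldl insStep (F4.foldl insStep PySem.Dict.empty)).getD k (0, "", "", "", "")) ∘ (·.1)) := by
          apply List.map_congr_left
          intro x hx
          exact (hpt x hx).symm
  have hTperm : T.Perm (F5.foldl insStep (F4.foldl insStep PySem.Dict.empty)).values := by
    rw [hvals]
    nth_rewrite 1 [hTmap]
    exact List.Perm.map _ hperm
  exact PySem.List.sorted_eq_of_perm_of_pairwise_lt _ T (fun it => it.1) hTperm hTpair

def bodyA (ana : PySem.Dict String (String × String)) (text : String) (L : Int)
    (found : List (Int × String × String × String × String)) (i : Int) :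
    List (Int × String × String × String × String) :=
  let substring := PySem.Str.slice text (some i) (some (i + L))
  let reversed_sub := (PySem.Str.slice? substring none none (-1)).getD ""
  let sorted_sub := String.ofList (PySem.List.sorted substring.toList (fun c => c) false)
  match BACKSLANG_WORDS.get? reversed_sub with
  | some note => found ++ [(i, substring, reversed_sub, note, "reversal")]
  | none =>
    match ana.get? sorted_sub with
    | some (target, note) => if substring ≠ target then found ++ [(i, substring, target, note, "anagram")] else found
    | none => found

theorem bodyA_eq (text : String) (L i : Int) (found : List (Int × String × String × String × String)) :
    bodyA anaD text L found i = found ++ (mAt text L i).toList := by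
  simp only [bodyA, mAt]
  cases h1 : BACKSLANG_WORDS.get? ((PySem.Str.slice? (PySem.Str.slice text (some i) (some (i + L))) none none (-1)).getD "") with
  | some note => simp
  | none =>
    cases h2 : anaD.get? (String.ofList (PySem.List.sorted (PySem.Str.slice text (some i) (some (i + L))).toList (fun c => c) false)) with
    | some tn =>
      obtain ⟨target, note⟩ := tn
      by_cases hne : PySem.Str.slice text (some i) (some (i + L)) ≠ target
      · simp only [if_pos hne]; simp
      · simp only [if_neg hne]; simp
    | none => simp

theorem foldl_bodyA (text : String) (L : Int) (l : List Nat)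
    (init : List (Int × String × String × String × String)) :
    l.foldl (fun acc (k : Nat) => bodyA anaD text L acc ((0 : Int) + (k : Int))) init
      = init ++ l.filterMap (fun (k : Nat) => mAt text L (k : Int)) := by
  induction l generalizing init with
  | nil => simp
  | cons a t ih =>
    rw [List.foldl_cons, bodyA_eq, zero_add, ih, List.filterMap_cons]
    cases h : mAt text L (a : Int) <;> simp

set_option maxHeartbeats 2000000 in
theorem A_eq_tgt (text : String) :
    find_backslang text
      = (List.range text.length).filterMap
          (fun j => ((if j + 5 ≤ text.length then mAt text 5 (j : Int) else none).or
              (if j + 4 ≤ text.length then mAt text 4 (j : Int) else none))) := by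
  have hana : BACKSLANG_WORDS.items.foldl
      (fun d wn => d.insert (String.ofList (PySem.List.sorted wn.1.toList (fun c => c) false)) (wn.1, wn.2))
      (PySem.Dict.empty : PySem.Dict String (String × String)) = anaD := by decide
  have h1 : find_backslang text = PySem.List.sorted
      ((((PySem.List.pyRange 3 8 1).foldl (fun found length =>
          (PySem.List.pyRange 0 ((PySem.Str.len text : Int) - length + 1) 1).foldl
            (bodyA anaD text length) found) []).foldl dedupStep PySem.Dict.empty).values)
      (fun it => it.1) false := by
    rw [← hana]
    rfl
  rw [h1]
  rw [show PySem.List.pyRange 3 8 1 = [(3 : Int), 4, 5, 6, 7] from by decide]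
  simp only [List.foldl_cons, List.foldl_nil]
  have hcol : ∀ (L : Int) (init : List (Int × String × String × String × String)),
      (PySem.List.pyRange 0 ((PySem.Str.len text : Int) - L + 1) 1).foldl (bodyA anaD text L) init
        = init ++ (List.range (((text.length : Int) - L + 1).toNat)).filterMap
            (fun (k : Nat) => mAt text L (k : Int)) := by
    intro L init
    rw [PySem.List.pyRange_one, List.foldl_map]
    rw [PySem.Str.len_eq_length]
    rw [show ((text.length : Int) - L + 1 - 0) = ((text.length : Int) - L + 1) by ring]
    exact foldl_bodyA text L _ init
  rw [hcol, hcol, hcol, hcol, hcol]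
  have h3 : (List.range (((text.length : Int) - 3 + 1).toNat)).filterMap
      (fun (k : Nat) => mAt text 3 (k : Int)) = [] := by
    apply List.filterMap_eq_nil_iff.mpr
    intro k _
    exact_mod_cast mAt_none_of_len text k 3 (by omega) (by omega)
  have h6 : (List.range (((text.length : Int) - 6 + 1).toNat)).filterMap
      (fun (k : Nat) => mAt text 6 (k : Int)) = [] := by
    apply List.filterMap_eq_nil_iff.mpr
    intro k hk
    have hk' := List.mem_range.mp hk
    exact_mod_cast mAt_none_of_len text k 6 (by omega) (by omega)
  have h7 : (List.range (((text.length : Int) - 7 + 1).toNat)).filterMap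
      (fun (k : Nat) => mAt text 7 (k : Int)) = [] := by
    apply List.filterMap_eq_nil_iff.mpr
    intro k hk
    have hk' := List.mem_range.mp hk
    exact_mod_cast mAt_none_of_len text k 7 (by omega) (by omega)
  rw [h3, h6, h7]
  simp only [List.nil_append, List.append_nil]
  rw [show ((text.length : Int) - 4 + 1).toNat = text.length + 1 - 4 by omega,
    show ((text.length : Int) - 5 + 1).toNat = text.length + 1 - 5 by omega]
  have hp4 : ∀ (j : Nat) x, mAt text 4 (j : Int) = some x → x.1 = (j : Int) := by
    intro j x h
    exact (mAt_shape text j 4 x (by exact_mod_cast h)).1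
  have hp5 : ∀ (j : Nat) x, mAt text 5 (j : Int) = some x → x.1 = (j : Int) := by
    intro j x h
    exact (mAt_shape text j 5 x (by exact_mod_cast h)).1
  have hl4 : ∀ (j : Nat) x, j + 4 ≤ text.length → mAt text 4 (j : Int) = some x → x.2.1.length = 4 := by
    intro j x hj h
    have := (mAt_shape text j 4 x (by exact_mod_cast h)).2
    omega
  have hl5 : ∀ (j : Nat) x, j + 5 ≤ text.length → mAt text 5 (j : Int) = some x → x.2.1.length = 5 := by
    intro j x hj h
    have := (mAt_shape text j 5 x (by exact_mod_cast h)).2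
    omega
  exact merge_gen text.length (fun (j : Nat) => mAt text 4 (j : Int)) (fun (j : Nat) => mAt text 5 (j : Int))
    hp4 hp5 hl4 hl5

theorem bsl_fit (text : String) (j L : Nat) (hL : 0 < L) (rest : List Int)
    (h : j + L ≤ text.length) :
    bslFirst revD anaD text (j : Int) ((L : Int) :: rest)
      = (mAt text (L : Int) (j : Int)).or (bslFirst revD anaD text (j : Int) rest) := by
  have hw : PySem.Str.len (PySem.Str.slice text (some (j : Int)) (some ((j : Int) + (L : Int)))) = L := by
    rw [PySem.Str.len_eq_length, sliceLen]; omega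
  simp only [bslFirst, hw]
  rw [if_neg (lt_irrefl _)]
  rw [revD_get?]
  simp only [mAt, PySem.Str.slice?_none_none_neg_one, Option.getD_some]
  cases hW : BACKSLANG_WORDS.get? (String.ofList (PySem.Str.slice text (some (j : Int)) (some ((j : Int) + (L : Int)))).toList.reverse) with
  | some note => simp only [Option.some_or]
  | none =>
    cases hA : anaD.get? (String.ofList (PySem.List.sorted (PySem.Str.slice text (some (j : Int)) (some ((j : Int) + (L : Int)))).toList (fun c => c) false)) with
    | some tn =>
      obtain ⟨target, note⟩ := tn
      by_cases hne : PySem.Str.slice text (some (j : Int)) (some ((j : Int) + (L : Int))) ≠ target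
      · simp only [if_pos hne, Option.some_or]
      · simp only [if_neg hne, Option.none_or]
    | none => simp only [Option.none_or]

theorem bsl_short (text : String) (j L : Nat) (hL : 0 < L) (rest : List Int)
    (h : text.length < j + L) :
    bslFirst revD anaD text (j : Int) ((L : Int) :: rest)
      = bslFirst revD anaD text (j : Int) rest := by
  have hw : PySem.Str.len (PySem.Str.slice text (some (j : Int)) (some ((j : Int) + (L : Int)))) = min L (text.length - j) := by
    rw [PySem.Str.len_eq_length, sliceLen]
  simp only [bslFirst, hw]
  rw [if_pos (by exact_mod_cast (by omega : min L (text.length - j) < L))]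

theorem bsl_eq (text : String) (j : Nat) :
    bslFirst revD anaD text (j : Int) [(5 : Int), 4]
      = ((if j + 5 ≤ text.length then mAt text 5 (j : Int) else none).or
          (if j + 4 ≤ text.length then mAt text 4 (j : Int) else none)) := by
  rw [show ((5 : Int) : Int) = ((5 : Nat) : Int) from rfl, show ((4 : Int) : Int) = ((4 : Nat) : Int) from rfl]
  by_cases h5 : j + 5 ≤ text.length
  · rw [bsl_fit text j 5 (by omega) _ h5, if_pos h5]
    rw [bsl_fit text j 4 (by omega) _ (by omega), if_pos (by omega)]
    rw [show bslFirst revD anaD text (j : Int) [] = none from rfl, Option.or_none]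
  · rw [bsl_short text j 5 (by omega) _ (by omega), if_neg h5, Option.none_or]
    by_cases h4 : j + 4 ≤ text.length
    · rw [bsl_fit text j 4 (by omega) _ h4, if_pos h4]
      rw [show bslFirst revD anaD text (j : Int) [] = none from rfl, Option.or_none]
    · rw [bsl_short text j 4 (by omega) _ (by omega), if_neg h4]
      rfl

theorem foldl_bslB (text : String) (l : List Nat)
    (init : List (Int × String × String × String × String)) :
    l.foldl (fun out (k : Nat) => out ++ (bslFirst revD anaD text ((0 : Int) + (k : Int)) [(5 : Int), 4]).toList) init
      = init ++ l.filterMap (fun (k : Nat) => bslFirst revD anaD text (k : Int) [(5 : Int), 4]) := by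
  induction l generalizing init with
  | nil => simp
  | cons a t ih =>
    rw [List.foldl_cons, zero_add, ih, List.filterMap_cons]
    cases h : bslFirst revD anaD text (a : Int) [(5 : Int), 4] <;> simp

set_option maxHeartbeats 2000000 in
theorem B_eq_tgt (text : String) :
    find_backslang_alt text
      = (List.range text.length).filterMap
          (fun j => ((if j + 5 ≤ text.length then mAt text 5 (j : Int) else none).or
              (if j + 4 ≤ text.length then mAt text 4 (j : Int) else none))) := by
  have hlk1 : (BACKSLANG_WORDS.items.foldl
      (fun ls wn =>
        (ls.1.insert ((PySem.Str.slice? wn.1 none none (-1)).getD "") (wn.1, wn.2),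
         ls.2.insert (String.ofList (PySem.List.sorted wn.1.toList (fun c => c) false)) (wn.1, wn.2)))
      ((PySem.Dict.empty : PySem.Dict String (String × String)),
       (PySem.Dict.empty : PySem.Dict String (String × String)))).1 = revD := by decide
  have hlk2 : (BACKSLANG_WORDS.items.foldl
      (fun ls wn =>
        (ls.1.insert ((PySem.Str.slice? wn.1 none none (-1)).getD "") (wn.1, wn.2),
         ls.2.insert (String.ofList (PySem.List.sorted wn.1.toList (fun c => c) false)) (wn.1, wn.2)))
      ((PySem.Dict.empty : PySem.Dict String (String × String)),
       (PySem.Dict.empty : PySem.Dict String (String × String)))).2 = anaD := by decide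
  have h1 : find_backslang_alt text
      = (PySem.List.pyRange 0 (PySem.Str.len text) 1).foldl
          (fun out i => out ++ (bslFirst revD anaD text i
            (PySem.List.sorted (PySem.Set.ofList (BACKSLANG_WORDS.keys.map (fun w => (PySem.Str.len w : Int))))
              (fun x => x) true)).toList) [] := by
    rw [← hlk1, ← hlk2]
    rfl
  rw [h1]
  rw [show (PySem.List.sorted (PySem.Set.ofList (BACKSLANG_WORDS.keys.map (fun w => (PySem.Str.len w : Int))))
      (fun x => x) true) = [(5 : Int), 4] from by decide]
  rw [PySem.List.pyRange_one, List.foldl_map]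
  rw [foldl_bslB]
  rw [show ((PySem.Str.len text : Int) - 0).toNat = text.length from by
    rw [PySem.Str.len_eq_length]; omega]
  rw [List.nil_append]
  apply List.filterMap_congr
  intro k _
  exact bsl_eq text k

-- ===== VERDICT (by name: the statement is the Claim_ definition above) =====
theorem find_backslang_spec : Claim_equal_find_backslang := by
  intro text _
  unfold Spec_find_backslang
  rw [A_eq_tgt, B_eq_tgt]
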